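-- pv_equiv track=rewrite | github.com/pypi-data/pypi-mirror-396 | packages/re-cue/re_cue-0.3.4.tar.gz/re_cue-0.3.4/reverse_engineer/analyzers/nodejs_express_analyzer.py | _check_authentication
-- ===== SOURCE A (Python) =====
-- def _check_authentication(lines: list[str], current_line: int) -> bool:
--     """Check for authentication middleware in nearby lines."""
--     # Check 5 lines before and 2 after
--     start = max(0, current_line - 5)
--     end = min(len(lines), current_line + 3)
--
--     auth_keywords = [
--         "authenticate",
--         "auth",
--         "isAuthenticated",
--         "requireAuth",
--         "verifyToken",
--         "checkAuth",
--         "protect",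
--         "authMiddleware",
--         "passport.authenticate",
--         "jwt",
--         "bearer",
--     ]
--
--     for line in lines[start:end]:
--         line_lower = line.lower()
--         if any(keyword in line_lower for keyword in auth_keywords):
--             return True
--
--     return False
-- ===== SOURCE B (Python) =====
-- def _check_authentication(lines: list[str], current_line: int) -> bool:
--     """Check for authentication middleware in nearby lines."""
--     # Check 5 lines before and 2 after
--     start = max(0, current_line - 5)
--     end = min(len(lines), current_line + 3)
--
--     auth_keywords = [
--         "authenticate",
--         "auth",
--         "isAuthenticated",
--         "requireAuth",
--         "verifyToken",
--         "checkAuth",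
--         "protect",
--         "authMiddleware",
--         "passport.authenticate",
--         "jwt",
--         "bearer",
--     ]
--
--     # Flatten the window into one lowercased string ('\n' keeps line
--     # boundaries, so no keyword can match across two lines) and scan it
--     # once per keyword.
--     blob = "\n".join(lines[start:end]).lower()
--     return any(keyword in blob for keyword in auth_keywords)
-- ===== Notes on version B (the rewrite author's own statement) =====
-- stated objective: simpler
-- what changed: B joins the window lines[start:end] into one '\n'-separated lowercased string built once and scans that single blob keyword-major, replacing A's line-major loop that lowercases and tests each line separately with early exit.
import Mathlib
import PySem

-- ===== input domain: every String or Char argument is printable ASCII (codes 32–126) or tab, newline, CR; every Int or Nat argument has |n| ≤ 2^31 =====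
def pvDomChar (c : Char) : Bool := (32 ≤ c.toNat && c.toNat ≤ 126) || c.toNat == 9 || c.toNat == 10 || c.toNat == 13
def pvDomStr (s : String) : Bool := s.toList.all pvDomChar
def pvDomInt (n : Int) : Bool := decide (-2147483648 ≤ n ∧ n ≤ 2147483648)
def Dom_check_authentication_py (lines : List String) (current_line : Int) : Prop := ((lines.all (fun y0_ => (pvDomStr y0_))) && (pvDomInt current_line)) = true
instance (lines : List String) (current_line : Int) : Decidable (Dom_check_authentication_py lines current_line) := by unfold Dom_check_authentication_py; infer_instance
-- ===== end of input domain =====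

-- B builds the '\n'-joined, lowercased window text once and scans it keyword-major,
-- instead of A's line-major loop with per-line lowercasing and early exit (objective: simpler).

-- ===== PORT A =====
-- the keyword list shared verbatim by both Pythons
def pvAuthKeywords : List String :=
  ["authenticate", "auth", "isAuthenticated", "requireAuth", "verifyToken",
   "checkAuth", "protect", "authMiddleware", "passport.authenticate", "jwt", "bearer"]

-- 'for line in lines[start:end]: if any(...): return True' / 'return False'
def pvCheckLoop (window : List String) : Bool :=
  match window with
  | [] => false
  | line :: rest =>
      let line_lower := PySem.Str.lower line
      if pvAuthKeywords.any (fun keyword => PySem.Str.isIn keyword line_lower) then true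
      else pvCheckLoop rest

def check_authentication_py (lines : List String) (current_line : Int) : Bool :=
  let start := max 0 (current_line - 5)
  let stop := min (PySem.List.len lines) (current_line + 3)
  pvCheckLoop (PySem.List.slice lines (some start) (some stop))

-- ===== PORT B =====
def check_authentication_py_alt (lines : List String) (current_line : Int) : Bool :=
  let start := max 0 (current_line - 5)
  let stop := min (PySem.List.len lines) (current_line + 3)
  let blob := PySem.Str.lower (PySem.Str.join "\n" (PySem.List.slice lines (some start) (some stop)))
  pvAuthKeywords.any (fun keyword => PySem.Str.isIn keyword blob)

-- ===== PRECONDITION & SPEC =====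
def Spec_check_authentication_py (lines : List String) (current_line : Int) (out : Bool) : Prop := out = check_authentication_py_alt lines current_line
instance (lines : List String) (current_line : Int) (out : Bool) : Decidable (Spec_check_authentication_py lines current_line out) := by unfold Spec_check_authentication_py; infer_instance

-- ===== CLAIM (what is proved, stated in full; the proofs are below) =====
def Claim_equal_check_authentication_py : Prop := ∀ (lines : List String) (current_line : Int), Dom_check_authentication_py lines current_line → Spec_check_authentication_py lines current_line (check_authentication_py lines current_line)

-- ===== LEMMAS AND PROOFS =====

-- A's early-exit loop is an 'any' over the window
theorem pvCheckLoop_eq_any (w : List String) :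
    pvCheckLoop w = w.any (fun l => pvAuthKeywords.any (fun k => PySem.Str.isIn k (PySem.Str.lower l))) := by
  induction w with
  | nil => rfl
  | cons line rest ih =>
      simp only [pvCheckLoop, List.any_cons]
      split_ifs with h
      · simp only [h, Bool.true_or]
      · simp only [Bool.not_eq_true] at h
        rw [ih, h, Bool.false_or]

-- the two nested 'any's commute
theorem pvAnySwap {α β : Type} (xs : List α) (ys : List β) (f : α → β → Bool) :
    xs.any (fun x => ys.any (fun y => f x y)) = ys.any (fun y => xs.any (fun x => f x y)) := by
  rw [Bool.eq_iff_iff]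
  simp only [List.any_eq_true]
  tauto

-- map distributes over intersperse (helper for lowercasing the joined text)
theorem pvMapIntersperse (f : Char → Char) (sep : List Char) (l : List (List Char)) :
    List.map (List.map f) (List.intersperse sep l)
      = List.intersperse (List.map f sep) (List.map (List.map f) l) := by
  induction l with
  | nil => rfl
  | cons x xs ih =>
      cases xs with
      | nil => rfl
      | cons y t => simp only [List.intersperse_cons₂, List.map_cons] at ih ⊢; simp [ih]

theorem pvMapIntercalate (f : Char → Char) (sep : List Char) (l : List (List Char)) :
    List.map f (List.intercalate sep l)
      = List.intercalate (List.map f sep) (List.map (List.map f) l) := by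
  simp [List.intercalate, pvMapIntersperse]

-- a prefix of a ++ c :: b avoiding c is a prefix of a
theorem pvPrefixSplit (c : Char) :
    ∀ (kw a b : List Char), c ∉ kw → kw <+: a ++ c :: b → kw <+: a := by
  intro kw
  induction kw with
  | nil => intro a b _ _; exact List.nil_prefix
  | cons k kw' ih =>
      intro a b hc hp
      cases a with
      | nil =>
          rcases (List.cons_prefix_cons.mp hp) with ⟨hk, _⟩
          exact absurd (hk ▸ List.mem_cons_self) hc
      | cons d a' =>
          rcases (List.cons_prefix_cons.mp hp) with ⟨hk, hp'⟩
          exact hk ▸ List.cons_prefix_cons.mpr ⟨rfl, ih a' b (fun h => hc (List.mem_cons_of_mem _ h)) hp'⟩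

-- an infix of a ++ c :: b avoiding c lies in a or in b
theorem pvInfixSplit (kw : List Char) (c : Char) (hc : c ∉ kw) :
    ∀ a b : List Char, (kw <:+: a ++ c :: b ↔ kw <:+: a ∨ kw <:+: b) := by
  intro a b
  constructor
  · intro h
    induction a with
    | nil =>
        rw [List.nil_append] at h
        rcases List.infix_cons_iff.mp h with h1 | h2
        · cases kw with
          | nil => exact Or.inl (List.nil_infix)
          | cons k kw' =>
              rcases List.cons_prefix_cons.mp h1 with ⟨hk, _⟩
              exact absurd (hk ▸ List.mem_cons_self) hc
        · exact Or.inr h2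
    | cons d a' ih =>
        rcases List.infix_cons_iff.mp h with h1 | h2
        · have : kw <+: d :: a' := pvPrefixSplit c kw (d :: a') b hc (by simpa using h1)
          exact Or.inl this.isInfix
        · rcases ih h2 with h3 | h4
          · exact Or.inl (List.infix_cons h3)
          · exact Or.inr h4
  · intro h
    rcases h with h | h
    · exact h.trans ⟨[], c :: b, by simp⟩
    · exact h.trans ⟨a ++ [c], [], by simp⟩

-- a newline-free nonempty keyword occurs in the '\n'-joined text iff it occurs in some part
theorem pvInfixJoin (kw : List Char) (hk : kw ≠ []) (hc : ('\n' : Char) ∉ kw) :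
    ∀ parts : List (List Char),
      (kw <:+: List.intercalate [('\n' : Char)] parts ↔ ∃ p ∈ parts, kw <:+: p) := by
  intro parts
  induction parts with
  | nil => simp [List.intercalate, hk]
  | cons p ps ih =>
      cases ps with
      | nil => simp [List.intercalate]
      | cons q t =>
          have hstep : List.intercalate [('\n' : Char)] (p :: q :: t)
              = p ++ ('\n' : Char) :: List.intercalate [('\n' : Char)] (q :: t) := by
            simp [List.intercalate]
          rw [hstep, pvInfixSplit kw '\n' hc p _, ih]
          simp

theorem pvKeyJoin (kw : List Char) (hk : kw ≠ []) (hc : ('\n' : Char) ∉ kw)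
    (parts : List (List Char)) :
    PySem.Chars.isIn kw (List.intercalate [('\n' : Char)] parts)
      = parts.any (fun p => PySem.Chars.isIn kw p) := by
  rw [Bool.eq_iff_iff]
  simp only [List.any_eq_true, PySem.Chars.isIn_iff_infix]
  exact pvInfixJoin kw hk hc parts

-- keyword list facts, checked once
theorem pvKeywordsOk : ∀ k ∈ pvAuthKeywords, k.toList ≠ [] ∧ ('\n' : Char) ∉ k.toList := by decide

-- scanning the lowercased joined window equals scanning each lowercased line
theorem pvBlobEq (k : String) (hk : k.toList ≠ []) (hc : ('\n' : Char) ∉ k.toList)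
    (w : List String) :
    PySem.Str.isIn k (PySem.Str.lower (PySem.Str.join "\n" w))
      = w.any (fun l => PySem.Str.isIn k (PySem.Str.lower l)) := by
  have hnl : ("\n" : String).toList = [('\n' : Char)] := by decide
  simp only [PySem.Str.isIn_eq, PySem.Str.toList_lower, PySem.Str.toList_join,
    PySem.Chars.join, hnl, PySem.Chars.lower]
  rw [pvMapIntercalate]
  have hsep : List.map PySem.Chars.lowerChar [('\n' : Char)] = [('\n' : Char)] := by decide
  rw [hsep, List.map_map, pvKeyJoin k.toList hk hc]
  simp [List.any_map, Function.comp_def]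

-- ===== VERDICT (by name: the statement is the Claim_ definition above) =====
theorem check_authentication_py_spec : Claim_equal_check_authentication_py := by
  unfold Claim_equal_check_authentication_py
  intro lines current_line _
  unfold Spec_check_authentication_py check_authentication_py check_authentication_py_alt
  rw [pvCheckLoop_eq_any, pvAnySwap]
  refine PySem.List.any_congr_mem ?_
  intro k hkmem
  rcases pvKeywordsOk k hkmem with ⟨hk, hc⟩
  exact (pvBlobEq k hk hc _).symm
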